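-- pv_equiv track=rewrite | github.com/dhruvagarwal29/dsa_practice | binary_search/medium/aggressive_cows.py | main1
-- ===== SOURCE A (Python) =====
-- def place_cows(stalls, min_dis, cows):
--     # we have to place first cow at first stall, to start with it
--     cows_counter = 1
--     last_cow_position = stalls[0]
--
--     for i in range(1, len(stalls)):
--
--         if stalls[i] - last_cow_position >= min_dis:
--             # means if the distnce between current stall and the last stall is
--             # greater than the min_dis then place the cow and update the last_cow_position
--             cows_counter += 1
--             last_cow_position = stalls[i]
--
--             if cows_counter == cows:
--                 return True
--         else:
--             continue
--
--     return False
--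
-- def main1(stalls, cows):
--     stalls.sort()  # sort the stalls
--     low = 1
--     high = stalls[-1] - stalls[0]  # max - min
--
--     while low <= high:
--         mid = (low + high) // 2
--
--         if place_cows(stalls, mid, cows):
--             low = mid + 1  # go to more distances
--         else:
--             high = mid - 1
--
--     return high
-- ===== SOURCE B (Python) =====
-- def place_cows(stalls, min_dis, cows):
--     cows_counter = 1
--     last_cow_position = stalls[0]
--     for i in range(1, len(stalls)):
--         if stalls[i] - last_cow_position >= min_dis:
--             cows_counter += 1
--             last_cow_position = stalls[i]
--             if cows_counter == cows:
--                 return True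
--     return False
--
--
-- def main1(stalls, cows):
--     # binary lifting over the answer: grow ans by descending powers of two
--     stalls.sort()  # mutates the argument, like the original
--     high = stalls[-1] - stalls[0]
--     ans = 0
--     step = 1 << high.bit_length()
--     while step >= 1:
--         if ans + step <= high and place_cows(stalls, ans + step, cows):
--             ans += step
--         step //= 2
--     return ans
-- ===== Notes on version B (the rewrite author's own statement) =====
-- stated objective: alternative
-- what changed: Replaces A's low/high binary-search loop over the answer range with binary lifting: the answer is grown greedily by descending powers of two (step = 1 << high.bit_length(), halved each iteration), using the same greedy feasibility check; Pre_ excludes only the empty stall list, on which A raises IndexError (B raises there too). Both sort the argument in place; equivalence is about the return value.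
import Mathlib
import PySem

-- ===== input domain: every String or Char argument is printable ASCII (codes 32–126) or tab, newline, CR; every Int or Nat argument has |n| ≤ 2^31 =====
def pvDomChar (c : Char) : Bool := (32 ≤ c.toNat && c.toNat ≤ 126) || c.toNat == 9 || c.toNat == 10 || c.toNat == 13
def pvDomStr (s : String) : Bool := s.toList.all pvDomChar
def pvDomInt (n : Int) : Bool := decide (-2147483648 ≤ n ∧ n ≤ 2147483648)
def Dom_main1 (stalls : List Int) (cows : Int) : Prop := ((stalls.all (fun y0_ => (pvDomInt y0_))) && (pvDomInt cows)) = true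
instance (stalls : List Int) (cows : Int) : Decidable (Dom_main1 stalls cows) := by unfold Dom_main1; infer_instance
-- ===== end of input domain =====

-- B replaces A's low/high binary search on the answer by binary lifting (descending
-- powers of two added to a running answer); same cost class, alternative structure.
-- Both A and B sort the 'stalls' argument in place; equivalence here is about the return value.

-- ===== PORT A =====
-- the for-loop of place_cows over stalls[1:], carrying (cows_counter, last_cow_position)
def placeLoop (minDis : Int) (cows : Int) (rest : List Int) (counter : Int) (last : Int) : Bool :=
  match rest with
  | [] => false
  | x :: xs =>
    if minDis ≤ x - last then
      if counter + 1 = cows then true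
      else placeLoop minDis cows xs (counter + 1) x
    else placeLoop minDis cows xs counter last

-- stalls[0] raises IndexError on []; Pre_main1 excludes the empty list, so the [] branch is never reached
def place_cows (stalls : List Int) (minDis : Int) (cows : Int) : Bool :=
  match stalls with
  | [] => false
  | s0 :: rest => placeLoop minDis cows rest 1 s0

-- the while low <= high loop of A
def bsLoop (stalls : List Int) (cows : Int) (low : Int) (high : Int) : Int :=
  if _h : low ≤ high then
    let mid := PySem.Int.floordiv (low + high) 2
    if place_cows stalls mid cows then bsLoop stalls cows (mid + 1) high
    else bsLoop stalls cows low (mid - 1)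
  else high
termination_by (high + 1 - low).toNat
decreasing_by
  · have := PySem.Int.floordiv_two_mid_bounds _h; omega
  · have := PySem.Int.floordiv_two_mid_bounds _h; omega

def main1 (stalls : List Int) (cows : Int) : Int :=
  let s := PySem.List.sorted stalls (fun x => x) false
  -- stalls[-1] / stalls[0] raise IndexError on []; Pre_main1 excludes it, the defaults are never read
  let high := PySem.List.pyGetD s (-1) 0 - PySem.List.pyGetD s 0 0
  bsLoop s cows 1 high

-- ===== PORT B =====
-- the while step >= 1 loop of B
def liftLoop (stalls : List Int) (cows : Int) (high : Int) (ans : Int) (step : Int) : Int :=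
  if _h : 1 ≤ step then
    let ans' := if ans + step ≤ high && place_cows stalls (ans + step) cows then ans + step else ans
    liftLoop stalls cows high ans' (PySem.Int.floordiv step 2)
  else ans
termination_by step.toNat
decreasing_by
  have := PySem.Int.floordiv_eq_ediv_of_pos (a := step) (b := 2) (by omega); omega

def main1_alt (stalls : List Int) (cows : Int) : Int :=
  let s := PySem.List.sorted stalls (fun x => x) false
  -- stalls[-1] / stalls[0] raise IndexError on []; Pre_main1 excludes it, the defaults are never read
  let high := PySem.List.pyGetD s (-1) 0 - PySem.List.pyGetD s 0 0
  liftLoop s cows high 0 ((1 : Int) <<< PySem.Int.bitLength high)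

-- ===== PRECONDITION & SPEC =====
-- Pre_ excludes only the empty list, on which A raises IndexError (stalls[0])
def Pre_main1 (stalls : List Int) (cows : Int) : Prop := stalls ≠ []
instance (stalls : List Int) (cows : Int) : Decidable (Pre_main1 stalls cows) := by unfold Pre_main1; infer_instance
def pvWitness_main1 : List Int × Int := ([1, 2, 4, 9], 3)

def Spec_main1 (stalls : List Int) (cows : Int) (out : Int) : Prop := out = main1_alt stalls cows
instance (stalls : List Int) (cows : Int) (out : Int) : Decidable (Spec_main1 stalls cows out) := by unfold Spec_main1; infer_instance

-- ===== CLAIM (what is proved, stated in full; the proofs are below) =====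
def Claim_equal_main1 : Prop := ∀ (stalls : List Int) (cows : Int), Dom_main1 stalls cows → Pre_main1 stalls cows → Spec_main1 stalls cows (main1 stalls cows)

-- ===== LEMMAS AND PROOFS =====

-- number of extra cows the greedy places on xs with gap d, starting from position last
def cnt (d : Int) (xs : List Int) (last : Int) : Int :=
  match xs with
  | [] => 0
  | y :: ys => if d ≤ y - last then 1 + cnt d ys y else cnt d ys last

lemma cnt_nonneg (d : Int) (xs : List Int) (last : Int) : 0 ≤ cnt d xs last := by
  induction xs generalizing last with
  | nil => simp [cnt]
  | cons y ys ih => simp only [cnt]; split <;> [skip; exact ih last] ; have := ih y; omega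

lemma placeLoop_iff_cnt (d cows : Int) :
    ∀ (xs : List Int) (c last : Int),
      placeLoop d cows xs c last = true ↔ (c < cows ∧ cows ≤ c + cnt d xs last) := by
  intro xs
  induction xs with
  | nil => intro c last; simp [placeLoop, cnt] <;> omega
  | cons y ys ih =>
    intro c last
    simp only [placeLoop, cnt]
    by_cases h : d ≤ y - last
    · simp only [if_pos h]
      by_cases hc : c + 1 = cows
      · simp only [if_pos hc]
        have h0 := cnt_nonneg d ys y
        simp
        omega
      · simp only [if_neg hc, ih]
        omega
    · simp only [if_neg h, ih]

lemma cnt_ML (d : Int) :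
    ∀ (xs : List Int), xs.Pairwise (· ≤ ·) →
      ∀ last last' : Int, last ≤ last' →
        cnt d xs last' ≤ cnt d xs last ∧
        ((∀ z ∈ xs, last' ≤ z) → cnt d xs last ≤ 1 + cnt d xs last') := by
  intro xs
  induction xs with
  | nil => intro _ last last' _; simp [cnt]
  | cons y ys ih =>
    intro hp last last' hll
    have hyz : ∀ z ∈ ys, y ≤ z := (List.pairwise_cons.mp hp).1
    have hpy : ys.Pairwise (· ≤ ·) := (List.pairwise_cons.mp hp).2
    constructor
    · -- cnt (y::ys) last' ≤ cnt (y::ys) last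
      simp only [cnt]
      by_cases h' : d ≤ y - last'
      · have h : d ≤ y - last := by omega
        simp [h, h']
      · by_cases h : d ≤ y - last
        · simp only [if_neg h', if_pos h]
          by_cases hcase : last' ≤ y
          · have := (ih hpy last' y hcase).2 hyz; omega
          · have := (ih hpy y last' (by omega)).1; omega
        · simp only [if_neg h', if_neg h]
          exact (ih hpy last last' hll).1
    · intro hz
      have hz' : last' ≤ y := hz y (by simp)
      simp only [cnt]
      by_cases h : d ≤ y - last
      · simp only [if_pos h]
        by_cases h' : d ≤ y - last'
        · simp [h']
        · simp only [if_neg h']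
          have := (ih hpy last' y hz').1; omega
      · have h' : ¬ d ≤ y - last' := by omega
        simp only [if_neg h, if_neg h']
        exact (ih hpy last last' hll).2 (fun z hzm => hz z (by simp [hzm]))

lemma cnt_mono_d (d d' : Int) (h1 : 1 ≤ d') (hdd : d' ≤ d) :
    ∀ (xs : List Int), xs.Pairwise (· ≤ ·) → ∀ last : Int,
      cnt d xs last ≤ cnt d' xs last := by
  intro xs
  induction xs with
  | nil => intro _ last; simp [cnt]
  | cons y ys ih =>
    intro hp last
    have hyz : ∀ z ∈ ys, y ≤ z := (List.pairwise_cons.mp hp).1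
    have hpy : ys.Pairwise (· ≤ ·) := (List.pairwise_cons.mp hp).2
    simp only [cnt]
    by_cases h : d ≤ y - last
    · have h' : d' ≤ y - last := by omega
      simp only [if_pos h, if_pos h']
      have := ih hpy y; omega
    · simp only [if_neg h]
      by_cases h' : d' ≤ y - last
      · simp only [if_pos h']
        have hL := (cnt_ML d' ys hpy last y (by omega)).2 hyz
        have := ih hpy last
        omega
      · simp only [if_neg h']
        exact ih hpy last

lemma place_mono (S : List Int) (c : Int) (hp : S.Pairwise (· ≤ ·)) (d d' : Int)
    (h1 : 1 ≤ d') (hdd : d' ≤ d) (h : place_cows S d c = true) :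
    place_cows S d' c = true := by
  cases S with
  | nil => simpa [place_cows] using h
  | cons s0 rest =>
    have hpr : rest.Pairwise (· ≤ ·) := (List.pairwise_cons.mp hp).2
    rw [place_cows, placeLoop_iff_cnt] at h ⊢
    have := cnt_mono_d d d' h1 hdd rest hpr s0
    omega

-- the largest feasible distance in [1, h] (0 when none), scanned from the top
def maxF (S : List Int) (c : Int) (h : Int) : Int :=
  if _hh : h ≤ 0 then 0
  else if place_cows S h c then h else maxF S c (h - 1)
termination_by h.toNat

lemma maxF_props (S : List Int) (c : Int) :
    ∀ (n : Nat) (h : Int), h ≤ (n : Int) →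
      0 ≤ maxF S c h ∧ maxF S c h ≤ max h 0 ∧
      (0 < maxF S c h → place_cows S (maxF S c h) c = true) ∧
      (∀ d, maxF S c h < d → d ≤ h → place_cows S d c = false) := by
  intro n
  induction n with
  | zero =>
    intro h hn
    rw [maxF, dif_pos (by exact_mod_cast hn)]
    refine ⟨le_refl 0, by omega, by omega, ?_⟩
    intro d hd1 hd2; omega
  | succ n ih =>
    intro h hn
    by_cases hh : h ≤ 0
    · rw [maxF, dif_pos hh]
      refine ⟨le_refl 0, by omega, by omega, ?_⟩
      intro d hd1 hd2; omega
    · rw [maxF, dif_neg hh]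
      by_cases hpl : place_cows S h c = true
      · simp only [if_pos hpl]
        refine ⟨by omega, by omega, fun _ => hpl, ?_⟩
        intro d hd1 hd2; omega
      · simp only [if_neg hpl]
        obtain ⟨i1, i2, i3, i4⟩ := ih (h - 1) (by omega)
        refine ⟨i1, by omega, i3, ?_⟩
        intro d hd1 hd2
        by_cases hdh : d ≤ h - 1
        · exact i4 d hd1 hdh
        · have : d = h := by omega
          subst this
          simpa using hpl

lemma maxF_uniq (S : List Int) (c : Int) (h a : Int) (ha0 : 0 ≤ a) (hah : a ≤ h)
    (hfeas : a = 0 ∨ place_cows S a c = true)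
    (habove : ∀ d, a < d → d ≤ h → place_cows S d c = false) :
    a = maxF S c h := by
  obtain ⟨m0, mle, mfeas, mabove⟩ := maxF_props S c h.toNat h (by omega)
  set m := maxF S c h with hm
  rcases lt_trichotomy a m with hlt | heq | hgt
  · have : place_cows S m c = true := mfeas (by omega)
    have : place_cows S m c = false := habove m hlt (by omega)
    simp_all
  · exact heq
  · have hfa : place_cows S a c = true := by
      rcases hfeas with h0 | hf
      · omega
      · exact hf
    have : place_cows S a c = false := mabove a hgt hah
    simp_all

lemma bsLoop_eq (S : List Int) (c H : Int)
    (hmono : ∀ d d', 1 ≤ d' → d' ≤ d → place_cows S d c = true → place_cows S d' c = true) :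
    ∀ (n : Nat) (low high : Int), (high + 1 - low).toNat ≤ n →
      1 ≤ low → low ≤ high + 1 → high ≤ H →
      (low = 1 ∨ place_cows S (low - 1) c = true) →
      (∀ d, high < d → d ≤ H → place_cows S d c = false) →
      bsLoop S c low high = maxF S c H := by
  intro n
  induction n with
  | zero =>
    intro low high hsz h1 h2 h3 h4 h5
    have hlh : ¬ low ≤ high := by omega
    rw [bsLoop, dif_neg hlh]
    refine maxF_uniq S c H high (by omega) h3 ?_ (fun d hd1 hd2 => h5 d hd1 hd2)
    rcases h4 with h4 | h4
    · left; omega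
    · right; have heq : low - 1 = high := by omega
      rwa [heq] at h4
  | succ n ih =>
    intro low high hsz h1 h2 h3 h4 h5
    by_cases hlh : low ≤ high
    · rw [bsLoop, dif_pos hlh]
      have hmid := PySem.Int.floordiv_two_mid_bounds hlh
      set mid := PySem.Int.floordiv (low + high) 2 with hmiddef
      by_cases hpl : place_cows S mid c = true
      · simp only [hpl, if_true]
        exact ih (mid + 1) high (by omega) (by omega) (by omega) h3
          (Or.inr (by simpa using hpl)) h5
      · simp only [hpl, if_false]
        refine ih low (mid - 1) (by omega) h1 (by omega) (by omega) h4 ?_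
        intro d hd1 hd2
        by_cases hdh : d ≤ high
        · by_contra hcon
          have hdt : place_cows S d c = true := by
            cases hx : place_cows S d c
            · exact absurd hx hcon
            · rfl
          exact hpl (hmono d mid (by omega) (by omega) hdt)
        · exact h5 d (by omega) hd2
    · rw [bsLoop, dif_neg hlh]
      refine maxF_uniq S c H high (by omega) h3 ?_ (fun d hd1 hd2 => h5 d hd1 hd2)
      rcases h4 with h4 | h4
      · left; omega
      · right; have heq : low - 1 = high := by omega
        rwa [heq] at h4

lemma liftLoop_eq (S : List Int) (c H : Int) (hH : 0 ≤ H)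
    (hmono : ∀ d d', 1 ≤ d' → d' ≤ d → place_cows S d c = true → place_cows S d' c = true) :
    ∀ (k : Nat) (ans : Int), 0 ≤ ans → ans ≤ maxF S c H →
      maxF S c H < ans + 2 * 2 ^ k →
      liftLoop S c H ans ((2 : Int) ^ k) = maxF S c H := by
  obtain ⟨m0, mle, mfeas, mabove⟩ := maxF_props S c H.toNat H (by omega)
  set m := maxF S c H with hm
  have hmH : m ≤ H := by omega
  -- one iteration's update is correct
  have hstep : ∀ (ans step : Int), 0 ≤ ans → 1 ≤ step → ans ≤ m →
      ((ans + step ≤ H && place_cows S (ans + step) c) = true →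
        (ans + step ≤ m)) ∧
      ((ans + step ≤ H && place_cows S (ans + step) c) ≠ true → m < ans + step) := by
    intro ans step hans hstep hansm
    constructor
    · intro htaken
      rw [Bool.and_eq_true] at htaken
      have h1 : ans + step ≤ H := by exact_mod_cast of_decide_eq_true htaken.1
      by_contra hcon
      have := mabove (ans + step) (by omega) h1
      simp [this] at htaken
    · intro hnot
      by_contra hcon
      push_neg at hcon
      -- m ≥ ans + step ≥ 1, so place (ans+step) via mono, and ans+step ≤ m ≤ H
      have hmpos : 0 < m := by omega
      have hfm := mfeas hmpos
      have hf : place_cows S (ans + step) c = true := hmono m (ans + step) (by omega) hcon hfm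
      have : (ans + step ≤ H && place_cows S (ans + step) c) = true := by
        rw [Bool.and_eq_true]
        exact ⟨by simp; omega, hf⟩
      exact hnot this
  intro k
  induction k with
  | zero =>
    intro ans hans hansm hub
    rw [liftLoop, dif_pos (by norm_num)]
    have h2 : PySem.Int.floordiv ((2:Int) ^ 0) 2 = 0 := by decide
    rw [h2, liftLoop, dif_neg (by norm_num)]
    obtain ⟨ht, hnt⟩ := hstep ans 1 hans (by norm_num) hansm
    simp only [pow_zero] at hub ⊢
    by_cases hc : (ans + 1 ≤ H && place_cows S (ans + 1) c) = true
    · rw [if_pos hc]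
      have := ht hc; omega
    · rw [if_neg hc]
      have := hnt hc; omega
  | succ k ih =>
    intro ans hans hansm hub
    have hpow : (0 : Int) < 2 ^ (k + 1) := pow_pos (by norm_num) (k + 1)
    rw [liftLoop, dif_pos (by omega)]
    have h2 : PySem.Int.floordiv ((2:Int) ^ (k + 1)) 2 = (2 : Int) ^ k := by
      rw [PySem.Int.floordiv_eq_ediv_of_pos (by norm_num), pow_succ]
      exact Int.mul_ediv_cancel _ (by norm_num)
    rw [h2]
    have hsp : (1 : Int) ≤ 2 ^ (k + 1) := by omega
    obtain ⟨ht, hnt⟩ := hstep ans ((2:Int) ^ (k + 1)) hans hsp hansm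
    by_cases hc : (ans + 2 ^ (k + 1) ≤ H && place_cows S (ans + 2 ^ (k + 1)) c) = true
    · rw [if_pos hc]
      refine ih (ans + 2 ^ (k + 1)) (by omega) (ht hc) ?_
      have : (2:Int) ^ (k + 1) = 2 * 2 ^ k := by ring
      omega
    · rw [if_neg hc]
      refine ih ans hans hansm ?_
      have := hnt hc
      have : (2:Int) ^ (k + 1) = 2 * 2 ^ k := by ring
      omega

-- ===== VERDICT (by name: the statement is the Claim_ definition above) =====
theorem main1_spec : Claim_equal_main1 := by
  intro stalls cows _hdom hpre
  unfold Spec_main1 main1 main1_alt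
  set S := PySem.List.sorted stalls (fun x => x) false with hS
  have hne : S ≠ [] := by
    rw [hS, Ne, PySem.List.sorted_eq_nil_iff]; exact hpre
  have hpair : S.Pairwise (· ≤ ·) := by
    simpa using PySem.List.sorted_pairwise (xs := stalls) (key := fun x => x)
  obtain ⟨s0, rest, hcons⟩ := List.exists_cons_of_ne_nil hne
  have hget0 : PySem.List.pyGetD S 0 0 = s0 := by rw [hcons]; exact PySem.List.pyGetD_zero_cons s0 rest 0
  have hlen : 1 ≤ S.length := by rw [hcons]; simp
  set H := PySem.List.pyGetD S (-1) 0 - PySem.List.pyGetD S 0 0 with hHdef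
  have hH : 0 ≤ H := by
    have hmem : PySem.List.pyGetD S (-1) 0 ∈ S := by
      apply PySem.List.pyGetD_mem
      simp [PySem.Raise.InRange]
      omega
    have hall : ∀ z ∈ S, s0 ≤ z := by
      intro z hz
      rw [hcons] at hz
      rcases List.mem_cons.mp hz with h | h
      · omega
      · have hp2 : (s0 :: rest).Pairwise (· ≤ ·) := hcons ▸ hpair
        exact (List.pairwise_cons.mp hp2).1 _ h
    have := hall _ hmem
    omega
  have hmono : ∀ d d', 1 ≤ d' → d' ≤ d → place_cows S d cows = true → place_cows S d' cows = true :=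
    fun d d' h1 hdd h => place_mono S cows hpair d d' h1 hdd h
  have hA : bsLoop S cows 1 H = maxF S cows H := by
    refine bsLoop_eq S cows H hmono H.toNat 1 H (by omega) (by omega) (by omega) (le_refl H)
      (Or.inl rfl) ?_
    intro d hd1 hd2; omega
  have hB : liftLoop S cows H 0 ((1 : Int) <<< PySem.Int.bitLength H) = maxF S cows H := by
    have hshift : (1 : Int) <<< PySem.Int.bitLength H = (2 : Int) ^ PySem.Int.bitLength H := by
      rw [Int.shiftLeft_eq]; ring
    rw [hshift]
    obtain ⟨m0, mle, _, _⟩ := maxF_props S cows H.toNat H (by omega)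
    refine liftLoop_eq S cows H hH hmono (PySem.Int.bitLength H) 0 (le_refl 0) m0 ?_
    have hlt : H.natAbs < 2 ^ PySem.Int.bitLength H := PySem.Int.lt_two_pow_bitLength H
    have : H < (2 : Int) ^ PySem.Int.bitLength H := by
      calc H ≤ (H.natAbs : Int) := by omega
        _ < ((2 ^ PySem.Int.bitLength H : Nat) : Int) := by exact_mod_cast hlt
        _ = (2 : Int) ^ PySem.Int.bitLength H := by push_cast; ring
    omega
  rw [hA, hB]
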